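-- pv_equiv track=rewrite | github.com/Ghaber099/ai-can-platform | backend/services/analyzer.py | improve_signal_guess
-- ===== SOURCE A (Python) =====
-- def pair_is_safe_sensor(signal_name, byte_meanings):
--     pair_map = {
--         "signal_0_1": [0, 1],
--         "signal_2_3": [2, 3],
--         "signal_4_5": [4, 5],
--         "signal_6_7": [6, 7],
--     }
--
--     bad_roles = {
--         "gear_or_state_field",
--         "rolling_counter",
--         "status_flag",
--         "checksum_or_validation_byte"
--     }
--
--     for byte_index in pair_map.get(signal_name, []):
--         if byte_meanings.get(byte_index) in bad_roles:
--             return False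
--
--     return True
--
-- def improve_signal_guess(signal_name, values, signal_values, message_type, byte_meanings):
--     if not pair_is_safe_sensor(signal_name, byte_meanings):
--         return "not_16bit_sensor", 20
--
--     # allow signals even in mixed frames
--     safe = pair_is_safe_sensor(signal_name, byte_meanings)
--
--     if not safe:
--         return "not_16bit_sensor", 20
--
--     # check if at least 2 bytes are real changing data
--     changing_bytes = list(byte_meanings.values()).count("changing_data")
--
--     if changing_bytes >= 2:
--         pass  # allow signal
--     else:
--         return "not_measurement_signal", 25
--
--     ranges = {
--         name: max(vals) - min(vals)
--         for name, vals in signal_values.items()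
--         if vals and pair_is_safe_sensor(name, byte_meanings)
--     }
--
--     if not ranges:
--         return "unknown_signal", 40
--
--     largest_signal = max(ranges, key=ranges.get)
--     smallest_signal = min(ranges, key=ranges.get)
--
--     if signal_name == largest_signal:
--         return "RPM_like_signal", 90
--
--     if signal_name == smallest_signal:
--         return "speed_like_or_small_sensor", 80
--
--     return "measurement_signal", 65
-- ===== SOURCE B (Python) =====
-- def improve_signal_guess(signal_name, values, signal_values, message_type, byte_meanings):
--     pair_map = {
--         "signal_0_1": (0, 1),
--         "signal_2_3": (2, 3),
--         "signal_4_5": (4, 5),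
--         "signal_6_7": (6, 7),
--     }
--     bad_roles = {
--         "gear_or_state_field",
--         "rolling_counter",
--         "status_flag",
--         "checksum_or_validation_byte",
--     }
--
--     def safe(name):
--         return all(byte_meanings.get(i) not in bad_roles
--                    for i in pair_map.get(name, ()))
--
--     if not safe(signal_name):
--         return "not_16bit_sensor", 20
--
--     if list(byte_meanings.values()).count("changing_data") < 2:
--         return "not_measurement_signal", 25
--
--     # one fused pass: running first-strict max and min of the ranges
--     largest = smallest = None
--     hi = lo = 0
--     for name, vals in signal_values.items():
--         if vals and safe(name):
--             rng = max(vals) - min(vals)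
--             if largest is None or rng > hi:
--                 largest, hi = name, rng
--             if smallest is None or rng < lo:
--                 smallest, lo = name, rng
--
--     if largest is None:
--         return "unknown_signal", 40
--     if signal_name == largest:
--         return "RPM_like_signal", 90
--     if signal_name == smallest:
--         return "speed_like_or_small_sensor", 80
--     return "measurement_signal", 65
-- ===== Notes on version B (the rewrite author's own statement) =====
-- stated objective: alternative
-- what changed: Removed the duplicated safety check and replaced A's ranges-dict comprehension plus max(...,key) and min(...,key) passes with one fused loop over signal_values.items() that keeps running (largest, smallest) range holders updated by strict comparisons.
import Mathlib
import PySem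

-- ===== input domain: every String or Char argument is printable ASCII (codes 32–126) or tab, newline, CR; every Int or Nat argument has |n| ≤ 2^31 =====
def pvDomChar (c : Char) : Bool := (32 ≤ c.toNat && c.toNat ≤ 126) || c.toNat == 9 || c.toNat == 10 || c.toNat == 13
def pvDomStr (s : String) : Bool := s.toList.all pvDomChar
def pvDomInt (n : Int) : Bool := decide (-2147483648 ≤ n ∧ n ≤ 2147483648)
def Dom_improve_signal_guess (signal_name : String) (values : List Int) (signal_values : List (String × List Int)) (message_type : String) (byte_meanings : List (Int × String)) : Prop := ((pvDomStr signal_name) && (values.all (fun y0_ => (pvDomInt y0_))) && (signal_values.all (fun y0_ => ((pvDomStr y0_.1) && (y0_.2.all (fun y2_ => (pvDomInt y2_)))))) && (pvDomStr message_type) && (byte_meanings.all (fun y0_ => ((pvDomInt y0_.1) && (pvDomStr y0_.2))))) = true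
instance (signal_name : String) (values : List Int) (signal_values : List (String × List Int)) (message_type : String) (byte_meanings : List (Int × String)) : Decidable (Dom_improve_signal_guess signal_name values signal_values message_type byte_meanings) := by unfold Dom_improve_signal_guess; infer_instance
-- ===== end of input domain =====

-- B fuses the ranges-dict construction and the max/min key searches of A into one
-- single pass keeping running (largest, smallest) with strict comparisons; same results.
-- Both Pythons treat `signal_values` / `byte_meanings` as dicts; the ports model this
-- with PySem.Dict.ofList (duplicate keys: last value wins, first position kept).

-- ===== PORT A =====
-- pair_map.get(signal_name, []) of the literal 4-key dict (exact: an if-chain over the keys)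
def pvPairMapA (name : String) : List Int :=
  if name = "signal_0_1" then [0, 1]
  else if name = "signal_2_3" then [2, 3]
  else if name = "signal_4_5" then [4, 5]
  else if name = "signal_6_7" then [6, 7]
  else []

-- `byte_meanings.get(i) in bad_roles` (None is never in the set)
def pvBadRoleA (r : Option String) : Bool :=
  match r with
  | some s => s == "gear_or_state_field" || s == "rolling_counter" || s == "status_flag"
      || s == "checksum_or_validation_byte"
  | none => false

def pairIsSafeSensorA (name : String) (bm : PySem.Dict Int String) : Bool :=
  (pvPairMapA name).all (fun i => !pvBadRoleA (bm.get? i))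

-- max(ranges, key=ranges.get): first key whose value is maximal (strict '>' keeps the first)
def pvMaxKeyA (items : List (String × Int)) : String :=
  match items with
  | [] => ""
  | p :: rest => (rest.foldl (fun best q => if q.2 > best.2 then q else best) p).1

def pvMinKeyA (items : List (String × Int)) : String :=
  match items with
  | [] => ""
  | p :: rest => (rest.foldl (fun best q => if q.2 < best.2 then q else best) p).1

def improve_signal_guess (signal_name : String) (values : List Int) (signal_values : List (String × List Int)) (message_type : String) (byte_meanings : List (Int × String)) : String × Int :=
  let bm := PySem.Dict.ofList byte_meanings
  let sv := PySem.Dict.ofList signal_values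
  if !pairIsSafeSensorA signal_name bm then ("not_16bit_sensor", 20)
  else
    let safe := pairIsSafeSensorA signal_name bm
    if !safe then ("not_16bit_sensor", 20)
    else
      let changing_bytes := bm.values.count "changing_data"
      if changing_bytes ≥ 2 then
        -- {name: max(vals)-min(vals) …}; max/min guarded by `vals` nonempty, so getD 0 is unreachable
        let ranges : PySem.Dict String Int :=
          sv.items.foldl (fun d p =>
            if !p.2.isEmpty && pairIsSafeSensorA p.1 bm
            then d.insert p.1 ((PySem.List.max? p.2 (fun x => x)).getD 0 - (PySem.List.min? p.2 (fun x => x)).getD 0)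
            else d) PySem.Dict.empty
        if ranges.items.isEmpty then ("unknown_signal", 40)
        else
          let largest := pvMaxKeyA ranges.items
          let smallest := pvMinKeyA ranges.items
          if signal_name = largest then ("RPM_like_signal", 90)
          else if signal_name = smallest then ("speed_like_or_small_sensor", 80)
          else ("measurement_signal", 65)
      else ("not_measurement_signal", 25)

-- ===== PORT B =====
def pvPairMapB (name : String) : List Int :=
  if name = "signal_0_1" then [0, 1]
  else if name = "signal_2_3" then [2, 3]
  else if name = "signal_4_5" then [4, 5]
  else if name = "signal_6_7" then [6, 7]
  else []

def pvSafeB (name : String) (bm : PySem.Dict Int String) : Bool :=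
  (pvPairMapB name).all (fun i =>
    !(match bm.get? i with
      | some s => s == "gear_or_state_field" || s == "rolling_counter" || s == "status_flag"
          || s == "checksum_or_validation_byte"
      | none => false))

-- one step of the fused pass: state = (largest, hi, smallest, lo)
def pvStepB (bm : PySem.Dict Int String)
    (st : Option String × Int × Option String × Int) (p : String × List Int) :
    Option String × Int × Option String × Int :=
  if !p.2.isEmpty && pvSafeB p.1 bm then
    let rng := (PySem.List.max? p.2 (fun x => x)).getD 0 - (PySem.List.min? p.2 (fun x => x)).getD 0
    let top := if st.1.isNone || rng > st.2.1 then (some p.1, rng) else (st.1, st.2.1)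
    let bot := if st.2.2.1.isNone || rng < st.2.2.2 then (some p.1, rng) else (st.2.2.1, st.2.2.2)
    (top.1, top.2, bot.1, bot.2)
  else st

def improve_signal_guess_alt (signal_name : String) (values : List Int) (signal_values : List (String × List Int)) (message_type : String) (byte_meanings : List (Int × String)) : String × Int :=
  let bm := PySem.Dict.ofList byte_meanings
  let sv := PySem.Dict.ofList signal_values
  if !pvSafeB signal_name bm then ("not_16bit_sensor", 20)
  else if bm.values.count "changing_data" < 2 then ("not_measurement_signal", 25)
  else
    match sv.items.foldl (pvStepB bm) (none, 0, none, 0) with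
    | (none, _, _, _) => ("unknown_signal", 40)
    | (some largest, _, smallest, _) =>
      if signal_name = largest then ("RPM_like_signal", 90)
      else if some signal_name = smallest then ("speed_like_or_small_sensor", 80)
      else ("measurement_signal", 65)

-- ===== PRECONDITION & SPEC =====
def Spec_improve_signal_guess (signal_name : String) (values : List Int) (signal_values : List (String × List Int)) (message_type : String) (byte_meanings : List (Int × String)) (out : String × Int) : Prop := out = improve_signal_guess_alt signal_name values signal_values message_type byte_meanings
instance (signal_name : String) (values : List Int) (signal_values : List (String × List Int)) (message_type : String) (byte_meanings : List (Int × String)) (out : String × Int) : Decidable (Spec_improve_signal_guess signal_name values signal_values message_type byte_meanings out) := by unfold Spec_improve_signal_guess; infer_instance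

-- ===== CLAIM (what is proved, stated in full; the proofs are below) =====
def Claim_equal_improve_signal_guess : Prop := ∀ (signal_name : String) (values : List Int) (signal_values : List (String × List Int)) (message_type : String) (byte_meanings : List (Int × String)), Dom_improve_signal_guess signal_name values signal_values message_type byte_meanings → Spec_improve_signal_guess signal_name values signal_values message_type byte_meanings (improve_signal_guess signal_name values signal_values message_type byte_meanings)

-- ===== LEMMAS AND PROOFS =====

theorem pvSafeB_eq (name : String) (bm : PySem.Dict Int String) :
    pvSafeB name bm = pairIsSafeSensorA name bm := rfl

-- the range of a non-empty value list, as both ports compute it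
def pvRng (vals : List Int) : Int :=
  (PySem.List.max? vals (fun x => x)).getD 0 - (PySem.List.min? vals (fun x => x)).getD 0

-- B's step on an entry that passed the filter, as a function of (name, range)
def pvStep' (st : Option String × Int × Option String × Int) (q : String × Int) :
    Option String × Int × Option String × Int :=
  let top := if st.1.isNone || q.2 > st.2.1 then (some q.1, q.2) else (st.1, st.2.1)
  let bot := if st.2.2.1.isNone || q.2 < st.2.2.2 then (some q.1, q.2) else (st.2.2.1, st.2.2.2)
  (top.1, top.2, bot.1, bot.2)

theorem pvStepB_eq (bm : PySem.Dict Int String) (st : Option String × Int × Option String × Int)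
    (p : String × List Int) :
    pvStepB bm st p =
      if !p.2.isEmpty && pvSafeB p.1 bm then pvStep' st (p.1, pvRng p.2) else st := rfl

-- once both components are set, the fused fold decomposes into the max fold and the min fold
theorem pvStep'_fold_some (L : List (String × Int)) (b s : String × Int) :
    L.foldl pvStep' (some b.1, b.2, some s.1, s.2) =
      (some (L.foldl (fun best q => if q.2 > best.2 then q else best) b).1,
       (L.foldl (fun best q => if q.2 > best.2 then q else best) b).2,
       some (L.foldl (fun best q => if q.2 < best.2 then q else best) s).1,
       (L.foldl (fun best q => if q.2 < best.2 then q else best) s).2) := by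
  induction L generalizing b s with
  | nil => rfl
  | cons q L ih =>
    simp only [List.foldl_cons]
    have hstep : pvStep' (some b.1, b.2, some s.1, s.2) q =
        (some (if q.2 > b.2 then q else b).1, (if q.2 > b.2 then q else b).2,
         some (if q.2 < s.2 then q else s).1, (if q.2 < s.2 then q else s).2) := by
      simp only [pvStep']
      by_cases h1 : q.2 > b.2 <;> by_cases h2 : q.2 < s.2 <;> simp [h1, h2]
    rw [hstep, ih]

-- the items of A's conditionally-built ranges dict are the filtered-and-mapped entries
theorem ranges_items (bm : PySem.Dict Int String) (l : List (String × List Int))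
    (hnd : (l.map Prod.fst).Nodup) :
    (l.foldl (fun d p =>
        if !p.2.isEmpty && pairIsSafeSensorA p.1 bm
        then d.insert p.1 ((PySem.List.max? p.2 (fun x => x)).getD 0 - (PySem.List.min? p.2 (fun x => x)).getD 0)
        else d) PySem.Dict.empty).items =
      (l.filter (fun p => !p.2.isEmpty && pairIsSafeSensorA p.1 bm)).map (fun p => (p.1, pvRng p.2)) := by
  rw [PySem.List.foldl_if_eq_foldl_filter]
  simp only [show ∀ v : List Int, (PySem.List.max? v (fun x => x)).getD 0 -
      (PySem.List.min? v (fun x => x)).getD 0 = pvRng v from fun _ => rfl]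
  rw [PySem.Dict.items_foldl_insert_fresh (k := Prod.fst) (v := fun p => pvRng p.2)]
  · rfl
  · intro a _; simp
  · exact hnd.sublist ((List.filter_sublist (l := l)).map Prod.fst)

-- B's fused fold over the raw entries equals pvStep' folded over the filtered mapped entries
theorem bfold_eq (bm : PySem.Dict Int String) (l : List (String × List Int)) :
    l.foldl (pvStepB bm) (none, 0, none, 0) =
      ((l.filter (fun p => !p.2.isEmpty && pairIsSafeSensorA p.1 bm)).map
          (fun p => (p.1, pvRng p.2))).foldl pvStep' (none, 0, none, 0) := by
  rw [List.foldl_map]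
  have : ∀ (init : Option String × Int × Option String × Int),
      l.foldl (pvStepB bm) init =
        l.foldl (fun st p => if !p.2.isEmpty && pairIsSafeSensorA p.1 bm
          then pvStep' st (p.1, pvRng p.2) else st) init := by
    intro init
    apply List.foldl_ext
    intro p _ st
    rw [pvStepB_eq, pvSafeB_eq]
  rw [this, PySem.List.foldl_if_eq_foldl_filter]

theorem improve_signal_guess_spec : Claim_equal_improve_signal_guess := by
  unfold Claim_equal_improve_signal_guess
  intro signal_name values signal_values message_type byte_meanings _
  unfold Spec_improve_signal_guess improve_signal_guess improve_signal_guess_alt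
  simp only [pvSafeB_eq]
  set bm := PySem.Dict.ofList byte_meanings with hbm
  set sv := PySem.Dict.ofList signal_values with hsv
  by_cases hsafe : pairIsSafeSensorA signal_name bm = true
  · simp only [hsafe, Bool.not_true, Bool.false_eq_true, if_false]
    by_cases hcb : bm.values.count "changing_data" ≥ 2
    · have hcb' : ¬ (bm.values.count "changing_data" < 2) := by omega
      simp only [if_pos hcb, if_neg hcb']
      have hnd : (sv.items.map Prod.fst).Nodup := PySem.Dict.nodup_keys_ofList signal_values
      rw [ranges_items bm sv.items hnd, bfold_eq bm sv.items]
      cases hL : (sv.items.filter (fun p => !p.2.isEmpty && pairIsSafeSensorA p.1 bm)).map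
          (fun p => (p.1, pvRng p.2)) with
      | nil => simp
      | cons q L =>
        simp only [List.foldl_cons, List.isEmpty_cons, Bool.false_eq_true, if_false]
        have hinit : pvStep' (none, 0, none, 0) q = (some q.1, q.2, some q.1, q.2) := by
          simp [pvStep']
        rw [hinit]
        rw [pvStep'_fold_some L q q]
        simp only [pvMaxKeyA, pvMinKeyA, Option.some.injEq]
        rfl
    · have hcb' : bm.values.count "changing_data" < 2 := by omega
      simp only [if_neg hcb, if_pos hcb']
  · simp only [Bool.not_eq_true] at hsafe
    simp [hsafe]
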